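-- pv_equiv track=rewrite | github.com/dazzbourgh/SpendEx | build_code_index.py | update_delimiter_depths
-- ===== SOURCE A (Python) =====
-- def update_delimiter_depths(
--     clean: str,
--     paren_depth: int,
--     bracket_depth: int,
--     brace_depth: int,
-- ) -> tuple[int, int, int]:
--     for char in clean:
--         if char == "(":
--             paren_depth += 1
--         elif char == ")" and paren_depth > 0:
--             paren_depth -= 1
--         elif char == "[":
--             bracket_depth += 1
--         elif char == "]" and bracket_depth > 0:
--             bracket_depth -= 1
--         elif char == "{":
--             brace_depth += 1
--         elif char == "}" and brace_depth > 0: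
--             brace_depth -= 1
--     return paren_depth, bracket_depth, brace_depth
-- ===== SOURCE B (Python) =====
-- def _depth(clean, open_ch, close_ch, depth):
--     for char in clean:
--         if char == open_ch:
--             depth += 1
--         elif char == close_ch and depth > 0:
--             depth -= 1
--     return depth
--
--
-- def update_delimiter_depths(
--     clean: str,
--     paren_depth: int,
--     bracket_depth: int,
--     brace_depth: int,
-- ) -> tuple[int, int, int]:
--     return (
--         _depth(clean, "(", ")", paren_depth),
--         _depth(clean, "[", "]", bracket_depth),
--         _depth(clean, "{", "}", brace_depth),
--     )
-- ===== Notes on version B (the rewrite author's own statement) =====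
-- stated objective: simpler
-- what changed: Replaces the single six-branch loop carrying three counters with a two-branch helper that tracks one delimiter pair, called three times, one pass per pair.
import Mathlib
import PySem

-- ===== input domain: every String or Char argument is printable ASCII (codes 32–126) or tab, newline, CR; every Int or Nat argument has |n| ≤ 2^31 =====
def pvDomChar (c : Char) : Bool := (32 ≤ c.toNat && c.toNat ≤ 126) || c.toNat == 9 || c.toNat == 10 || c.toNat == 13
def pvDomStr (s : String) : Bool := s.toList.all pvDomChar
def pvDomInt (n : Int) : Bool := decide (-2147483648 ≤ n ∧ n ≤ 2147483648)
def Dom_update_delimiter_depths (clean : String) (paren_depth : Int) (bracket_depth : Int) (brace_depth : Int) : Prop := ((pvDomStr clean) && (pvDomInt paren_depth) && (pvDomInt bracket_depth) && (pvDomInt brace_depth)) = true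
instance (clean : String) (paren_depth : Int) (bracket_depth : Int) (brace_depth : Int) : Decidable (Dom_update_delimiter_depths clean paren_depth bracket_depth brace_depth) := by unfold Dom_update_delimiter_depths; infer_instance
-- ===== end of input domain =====

-- B replaces A's single six-branch loop over three counters by a two-branch one-pair helper
-- called three times (one pass per delimiter pair): a simpler decomposition, same O(n) cost.


-- ===== PORT A =====
-- A's loop body: one six-branch elif chain updating the three counters together.
def updStepA (s : Int × Int × Int) (char : Char) : Int × Int × Int :=
  let (paren_depth, bracket_depth, brace_depth) := s
  if char = '(' then (paren_depth + 1, bracket_depth, brace_depth)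
  else if char = ')' ∧ paren_depth > 0 then (paren_depth - 1, bracket_depth, brace_depth)
  else if char = '[' then (paren_depth, bracket_depth + 1, brace_depth)
  else if char = ']' ∧ bracket_depth > 0 then (paren_depth, bracket_depth - 1, brace_depth)
  else if char = '{' then (paren_depth, bracket_depth, brace_depth + 1)
  else if char = '}' ∧ brace_depth > 0 then (paren_depth, bracket_depth, brace_depth - 1)
  else (paren_depth, bracket_depth, brace_depth)

def update_delimiter_depths (clean : String) (paren_depth : Int) (bracket_depth : Int) (brace_depth : Int) : Int × Int × Int :=
  clean.toList.foldl updStepA (paren_depth, bracket_depth, brace_depth)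

-- ===== PORT B =====
-- B's helper _depth: one pass over the string tracking a single delimiter pair.
def pvdepth (clean : String) (open_ch close_ch : Char) (depth : Int) : Int :=
  clean.toList.foldl
    (fun depth char =>
      if char = open_ch then depth + 1
      else if char = close_ch ∧ depth > 0 then depth - 1
      else depth)
    depth

def update_delimiter_depths_alt (clean : String) (paren_depth : Int) (bracket_depth : Int) (brace_depth : Int) : Int × Int × Int :=
  (pvdepth clean '(' ')' paren_depth,
   pvdepth clean '[' ']' bracket_depth,
   pvdepth clean '{' '}' brace_depth)

-- ===== PRECONDITION & SPEC =====
def Spec_update_delimiter_depths (clean : String) (paren_depth : Int) (bracket_depth : Int) (brace_depth : Int) (out : Int × Int × Int) : Prop := out = update_delimiter_depths_alt clean paren_depth bracket_depth brace_depth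
instance (clean : String) (paren_depth : Int) (bracket_depth : Int) (brace_depth : Int) (out : Int × Int × Int) : Decidable (Spec_update_delimiter_depths clean paren_depth bracket_depth brace_depth out) := by unfold Spec_update_delimiter_depths; infer_instance

-- ===== CLAIM (what is proved, stated in full; the proofs are below) =====
def Claim_equal_update_delimiter_depths : Prop := ∀ (clean : String) (paren_depth : Int) (bracket_depth : Int) (brace_depth : Int), Dom_update_delimiter_depths clean paren_depth bracket_depth brace_depth → Spec_update_delimiter_depths clean paren_depth bracket_depth brace_depth (update_delimiter_depths clean paren_depth bracket_depth brace_depth)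

-- ===== LEMMAS AND PROOFS =====
-- A's combined fold splits into three independent one-pair folds: each character
-- updates at most one component, and the branch it takes depends only on that component.
theorem foldl_updStepA_split (l : List Char) (p b r : Int) :
    l.foldl updStepA (p, b, r) =
      (l.foldl (fun d c => if c = '(' then d + 1 else if c = ')' ∧ d > 0 then d - 1 else d) p,
       l.foldl (fun d c => if c = '[' then d + 1 else if c = ']' ∧ d > 0 then d - 1 else d) b,
       l.foldl (fun d c => if c = '{' then d + 1 else if c = '}' ∧ d > 0 then d - 1 else d) r) := by
  induction l generalizing p b r with
  | nil => rfl
  | cons c t ih =>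
    simp only [List.foldl_cons, updStepA]
    split_ifs <;> simp_all

-- ===== VERDICT (by name: the statement is the Claim_ definition above) =====
theorem update_delimiter_depths_spec : Claim_equal_update_delimiter_depths := by
  intro clean p b r _
  unfold Spec_update_delimiter_depths update_delimiter_depths update_delimiter_depths_alt pvdepth
  exact foldl_updStepA_split _ _ _ _
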